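-- pv_equiv track=rewrite | github.com/WeildTheSword/BondScrape | POS/parse_remote_pdfs.py | vote_list
-- ===== SOURCE A (Python) =====
-- from collections import Counter
--
-- def vote_list(values: list[list[str]]) -> list[str]:
--     flat = []
--     for arr in values:
--         flat.extend(arr)
--     if not flat:
--         return []
--     counts = Counter(flat)
--     return [k for k, _ in counts.most_common()]
-- ===== SOURCE B (Python) =====
-- def vote_list(values: list[list[str]]) -> list[str]:
--     counts = {}
--     for arr in values:
--         for v in arr:
--             counts[v] = counts.get(v, 0) + 1
--     if not counts:
--         return []
--     buckets = {}
--     for k, c in counts.items():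
--         buckets.setdefault(c, []).append(k)
--     out = []
--     for c in range(max(buckets), 0, -1):
--         out.extend(buckets.get(c, []))
--     return out
-- ===== Notes on version B (the rewrite author's own statement) =====
-- stated objective: alternative
-- what changed: Replaces flatten + Counter.most_common (a comparison sort of the unique values by count) with a single dict-counting pass followed by a bucket sort: keys are appended to a bucket per frequency in first-seen order and the buckets are emitted from the maximum count down to 1.
import Mathlib
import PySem

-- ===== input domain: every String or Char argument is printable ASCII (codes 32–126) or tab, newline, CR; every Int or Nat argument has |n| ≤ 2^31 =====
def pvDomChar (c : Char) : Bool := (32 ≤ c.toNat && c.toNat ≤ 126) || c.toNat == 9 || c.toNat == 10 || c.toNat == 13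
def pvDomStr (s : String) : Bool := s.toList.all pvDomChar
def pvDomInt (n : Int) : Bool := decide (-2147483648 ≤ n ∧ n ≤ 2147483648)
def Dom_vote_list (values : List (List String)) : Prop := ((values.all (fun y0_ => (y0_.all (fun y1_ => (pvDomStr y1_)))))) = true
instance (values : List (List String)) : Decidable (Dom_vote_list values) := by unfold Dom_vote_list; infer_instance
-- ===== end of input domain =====

-- B replaces Counter.most_common (a comparison sort of the counts) by a single counting pass
-- plus a bucket sort over frequencies (objective: alternative algorithm, same measured cost).


-- ===== PORT A =====
-- flat.extend(arr) loop; Counter(flat); most_common() = sorted(items, key=count, reverse=True) (stable), keys only.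
def vote_list (values : List (List String)) : List String :=
  let flat := values.foldl (fun flat arr => flat ++ arr) []
  if flat = [] then []
  else
    let counts := PySem.Dict.counter flat
    (PySem.List.sorted counts.items (fun p => p.2) true).map (fun p => p.1)

-- ===== PORT B =====
-- counts built pair by pair; buckets : dict count → names (setdefault(c, []).append(k) = modify c [] (· ++ [k]));
-- then the buckets are emitted for c = max(buckets) down to 1.
def vote_list_alt (values : List (List String)) : List String :=
  let counts : PySem.Dict String Int :=
    values.foldl (fun d arr => arr.foldl (fun d v => d.insert v (d.getD v 0 + 1)) d) PySem.Dict.empty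
  if counts.items = [] then []
  else
    let buckets : PySem.Dict Int (List String) :=
      counts.items.foldl (fun b p => b.modify p.2 [] (fun l => l ++ [p.1])) PySem.Dict.empty
    let maxc := PySem.List.maxD buckets.keys (fun c => c) 0
    (PySem.List.pyRange maxc 0 (-1)).foldl (fun out c => out ++ buckets.getD c []) []

-- ===== PRECONDITION & SPEC =====
def Spec_vote_list (values : List (List String)) (out : List String) : Prop := out = vote_list_alt values
instance (values : List (List String)) (out : List String) : Decidable (Spec_vote_list values out) := by unfold Spec_vote_list; infer_instance

-- ===== CLAIM (what is proved, stated in full; the proofs are below) =====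
def Claim_equal_vote_list : Prop := ∀ (values : List (List String)), Dom_vote_list values → Spec_vote_list values (vote_list values)

-- ===== LEMMAS AND PROOFS =====

-- nested count loop = one loop over the flattened list
theorem pv_foldl_foldl {α β : Type} (values : List (List α)) (g : β → α → β) (d : β) :
    values.foldl (fun d arr => arr.foldl g d) d = (values.flatMap id).foldl g d := by
  induction values generalizing d with
  | nil => rfl
  | cons a t ih => simp [List.foldl_append, ih]

theorem pv_insertBy_all_before {α : Type} (before : α → α → Bool) (x : α) (ys : List α)
    (h : ∀ y ∈ ys, before x y = true) : PySem.List.insertBy before x ys = x :: ys := by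
  cases ys with
  | nil => rfl
  | cons y t => simp [PySem.List.insertBy, h y (by simp)]

theorem pv_insertBy_append_left {α : Type} (before : α → α → Bool) (x : α) (pre ys : List α)
    (h : ∀ y ∈ pre, before x y = false) :
    PySem.List.insertBy before x (pre ++ ys) = pre ++ PySem.List.insertBy before x ys := by
  induction pre with
  | nil => rfl
  | cons p t ih =>
      have hp : before x p = false := h p (by simp)
      simp [PySem.List.insertBy, hp, ih (fun y hy => h y (by simp [hy]))]

-- inserting x into a bucket-concatenation puts it at the end of its bucket
theorem pv_insertBy_flatMap {α : Type} (cs : List Int) (g : Int → List (α × Int)) (x : α × Int)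
    (hdec : cs.Pairwise (· > ·)) (hg : ∀ c ∈ cs, ∀ p ∈ g c, p.2 = c) (hx : x.2 ∈ cs) :
    PySem.List.insertBy (fun a b => decide (b.2 < a.2)) x (cs.flatMap g)
      = cs.flatMap (fun c => if x.2 = c then g c ++ [x] else g c) := by
  induction cs with
  | nil => simp at hx
  | cons c cs ih =>
      have hdec' := (List.pairwise_cons.mp hdec).2
      have hcgt : ∀ c' ∈ cs, c > c' := (List.pairwise_cons.mp hdec).1
      by_cases hxc : x.2 = c
      · have h1 : ∀ y ∈ g c, (fun a b : α × Int => decide (b.2 < a.2)) x y = false := by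
          intro y hy
          have := hg c (by simp) y hy
          simp [this, hxc]
        have h2 : ∀ y ∈ cs.flatMap g, (fun a b : α × Int => decide (b.2 < a.2)) x y = true := by
          intro y hy
          obtain ⟨c', hc', hyc'⟩ := List.mem_flatMap.mp hy
          have := hg c' (by simp [hc']) y hyc'
          simp [this, hxc]
          exact hcgt c' hc'
        rw [List.flatMap_cons, pv_insertBy_append_left _ _ _ _ h1,
            pv_insertBy_all_before _ _ _ h2]
        have h3 : cs.flatMap (fun c' => if x.2 = c' then g c' ++ [x] else g c') = cs.flatMap g := by
          apply List.flatMap_congr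
          intro c' hc'
          have : x.2 ≠ c' := by
            have := hcgt c' hc'; omega
          simp [this]
        rw [List.flatMap_cons, if_pos hxc, h3]
        simp
      · have hx' : x.2 ∈ cs := by
          rcases List.mem_cons.mp hx with h | h
          · exact absurd h hxc
          · exact h
        have h1 : ∀ y ∈ g c, (fun a b : α × Int => decide (b.2 < a.2)) x y = false := by
          intro y hy
          have hyc := hg c (by simp) y hy
          have hlt : x.2 < c := hcgt _ hx'
          simp [hyc]; omega
        rw [List.flatMap_cons, pv_insertBy_append_left _ _ _ _ h1,
            ih hdec' (fun c' hc' => hg c' (by simp [hc'])) hx']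
        simp [hxc]

-- descending-sort of a bucketed list is the concatenation of the buckets from high key to low
theorem pv_sorted_rev_eq_flatMap {α : Type} (l : List (α × Int)) (cs : List Int)
    (hdec : cs.Pairwise (· > ·)) (hmem : ∀ p ∈ l, p.2 ∈ cs) :
    PySem.List.sorted l (fun p => p.2) true = cs.flatMap (fun c => l.filter (fun p => p.2 == c)) := by
  induction l using List.reverseRecOn with
  | nil => simp [PySem.List.sorted]
  | append_singleton l x ih =>
      rw [PySem.List.sorted_rev_eq_foldl_insertBy, List.foldl_append, List.foldl_cons, List.foldl_nil,
          ← PySem.List.sorted_rev_eq_foldl_insertBy,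
          ih (fun p hp => hmem p (by simp [hp])),
          pv_insertBy_flatMap cs _ x hdec
            (by intro c hc p hp
                have := List.of_mem_filter hp
                simpa using this)
            (hmem x (by simp))]
      apply List.flatMap_congr
      intro c hc
      by_cases h : x.2 = c <;> simp [List.filter_append, h]

theorem pv_ofList_ne_nil {α : Type} [BEq α] [LawfulBEq α] (xs : List α) (h : xs ≠ []) :
    PySem.Set.ofList xs ≠ [] := by
  cases xs with
  | nil => exact absurd rfl h
  | cons a t =>
      intro hcon
      have : a ∈ PySem.Set.ofList (a :: t) := (PySem.Set.mem_ofList _ _).mpr (by simp)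
      simp [hcon] at this

theorem pv_pyRange_down (m : Int) :
    PySem.List.pyRange m 0 (-1) = List.map (fun k : Nat => m - (k : Int)) (List.range m.toNat) := by
  have hcount : (m - 0 + - -1 - 1) / - -1 = m := by norm_num
  simp only [PySem.List.pyRange, hcount]
  split_ifs <;>
    first
      | omega
      | (apply List.map_congr_left; intro k hk; omega)
      | simp_all

-- ===== VERDICT (by name: the statement is the Claim_ definition above) =====
theorem vote_list_spec : Claim_equal_vote_list := by
  intro values _
  unfold Spec_vote_list vote_list vote_list_alt
  simp only []
  -- the two count dictionaries coincide
  have hc : values.foldl (fun d arr => arr.foldl (fun d v => d.insert v (d.getD v 0 + 1)) d) PySem.Dict.empty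
      = PySem.Dict.counter (values.foldl (fun flat arr => flat ++ arr) []) := by
    rw [pv_foldl_foldl, PySem.Dict.foldl_insert_getD_add_one_eq_counter]
    congr 1
    rw [PySem.List.foldl_append_eq_flatMap]
    simp
  set flat := values.foldl (fun flat arr => flat ++ arr) [] with hflat
  rw [hc]
  by_cases hnil : flat = []
  · simp [hnil, PySem.Dict.counter, PySem.Dict.empty]
  · have hitems := PySem.Dict.items_counter flat
    have hitems_ne : (PySem.Dict.counter flat).items ≠ [] := by
      rw [hitems]
      intro hcon
      exact pv_ofList_ne_nil flat hnil (List.map_eq_nil_iff.mp hcon)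
    simp only [hnil, hitems_ne, if_false]
    set items := (PySem.Dict.counter flat).items with hi
    -- the buckets dict
    set buckets : PySem.Dict Int (List String) :=
      items.foldl (fun b p => b.modify p.2 [] (fun l => l ++ [p.1])) PySem.Dict.empty with hb
    have hkeys : buckets.keys = PySem.Set.ofList (items.map (fun p => p.2)) := by
      rw [hb, PySem.Dict.keys_foldl_modify_key items (fun p => p.2) [] (fun _ p => (fun l => l ++ [p.1]))]
      rfl
    have hkeys_ne : buckets.keys ≠ [] := by
      rw [hkeys]
      exact pv_ofList_ne_nil _ (by simpa [List.map_eq_nil_iff] using hitems_ne)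
    -- max of the bucket keys
    obtain ⟨m, hm⟩ : ∃ m, PySem.List.max? buckets.keys (fun c => c) = some m := by
      cases h : PySem.List.max? buckets.keys (fun c => c) with
      | none => exact absurd ((PySem.List.max?_eq_none_iff _ _).mp h) hkeys_ne
      | some m => exact ⟨m, rfl⟩
    have hmaxD : PySem.List.maxD buckets.keys (fun c => c) 0 = m := by
      simp [PySem.List.maxD, hm]
    rw [hmaxD]
    have hmmem : m ∈ buckets.keys := PySem.List.max?_mem hm
    have hmax : ∀ y ∈ buckets.keys, y ≤ m := PySem.List.max?_isMax hm
    -- every count is in [1, m]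
    have hcnt : ∀ p ∈ items, 1 ≤ p.2 ∧ p.2 ≤ m := by
      intro p hp
      constructor
      · rw [hitems] at hp
        obtain ⟨k, hk, rfl⟩ := List.mem_map.mp hp
        have : k ∈ flat := (PySem.Set.mem_ofList _ _).mp hk
        have := List.count_pos_iff.mpr this
        simp
        omega
      · exact hmax p.2 (by rw [hkeys]; exact (PySem.Set.mem_ofList _ _).mpr (by
          exact List.mem_map.mpr ⟨p, hp, rfl⟩))
    have hm1 : 1 ≤ m := by
      rw [hkeys] at hmmem
      have hmflat : m ∈ items.map (fun p => p.2) := (PySem.Set.mem_ofList _ _).mp hmmem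
      obtain ⟨p, hp, rfl⟩ := List.mem_map.mp hmflat
      exact (hcnt p hp).1
    -- the descending range
    have hrange := pv_pyRange_down m
    have hdec : (PySem.List.pyRange m 0 (-1)).Pairwise (· > ·) := by
      rw [hrange, List.pairwise_map]
      have := List.pairwise_lt_range (n := m.toNat)
      exact this.imp (by intro a b h; omega)
    have hmemr : ∀ p ∈ items, p.2 ∈ PySem.List.pyRange m 0 (-1) := by
      intro p hp
      obtain ⟨h1, h2⟩ := hcnt p hp
      rw [hrange]
      refine List.mem_map.mpr ⟨(m - p.2).toNat, List.mem_range.mpr (by omega), by omega⟩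
    -- A's sorted list = concatenation of the filters
    rw [pv_sorted_rev_eq_flatMap items (PySem.List.pyRange m 0 (-1)) hdec hmemr]
    -- B's loop = the same concatenation, bucket by bucket
    rw [PySem.List.foldl_append_eq_flatMap (fun c => buckets.getD c []) (PySem.List.pyRange m 0 (-1)) []]
    simp only [List.nil_append, List.map_flatMap]
    apply List.flatMap_congr
    intro c hc
    have : buckets.getD c [] = (items.filter (fun p => p.2 == c)).map (fun p => p.1) := by
      rw [hb]
      have : items.foldl (fun b p => b.modify p.2 [] (fun l => l ++ [p.1])) PySem.Dict.empty
          = (items.map Prod.swap).foldl (fun b q => b.modify q.1 [] (fun l => l ++ [q.2])) PySem.Dict.empty := by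
        rw [List.foldl_map]
        simp
      rw [this, PySem.Dict.getD_foldl_modify_append]
      simp [List.filter_map, Function.comp_def, Prod.swap]
    rw [this]
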